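-- pv_equiv track=rewrite | github.com/4DNucleome/tad_compare | tools/common_domains.py | find_common_domains
-- ===== SOURCE A (Python) =====
-- def find_common_domains(set1, set2, shift):
--     """Find all common domains in two sets of tads and given accepted shift in boundaries position"""
--     common_domains = []
--     for i in range(len(set1)):
--         for j in range(len(set2)):
--             if shift == 0:
--                 if check_domains(domain1=set1[i], domain2=set2[j]):
--                     common_domains.append(set1[i])
--             else:
--                 if check_shifted_domains(domain1=set1[i], domain2=set2[j], shift=shift):
--                     common_domains.append(set1[i])
--     return common_domains
--
-- def check_shifted_domains(domain1, domain2, shift):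
--     """Check if two domains positions are identical (with accepted shift)"""
--     if domain1[0] != domain2[0]:
--         return False
--     if domain2[1] - shift < 0:
--         start = 0
--     else:
--         start = domain2[1] - shift
--     if domain1[1] in range(start, domain2[1] + shift):
--         if domain1[2] in range(domain2[2] - shift, domain2[2] + shift):
--             return True
--     return False
--
-- def check_domains(domain1, domain2):
--     """Check if two domains have exact same boundaries"""
--     if domain2[0] != domain1[0]:
--         return False
--     if domain1[1] == domain2[1] and domain1[2] == domain2[2]:
--         return True
--     return False
-- ===== SOURCE B (Python) =====
-- def find_common_domains(set1, set2, shift):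
--     """Find all common domains in two sets of tads and given accepted shift in boundaries position.
--     Variant: index set2 by a hash (exact-triple counter for shift == 0, per-chromosome
--     buckets otherwise) instead of the all-pairs scan."""
--     if shift == 0:
--         counts = {}
--         for d in set2:
--             k = (d[0], d[1], d[2])
--             counts[k] = counts.get(k, 0) + 1
--         out = []
--         for d in set1:
--             out += [d] * counts.get((d[0], d[1], d[2]), 0)
--         return out
--     buckets = {}
--     for d in set2:
--         buckets[d[0]] = buckets.get(d[0], []) + [d]
--     out = []
--     for d in set1:
--         n = 0
--         for b in buckets.get(d[0], []):
--             lo = b[1] - shift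
--             if lo < 0:
--                 lo = 0
--             if lo <= d[1] < b[1] + shift and b[2] - shift <= d[2] < b[2] + shift:
--                 n += 1
--         out += [d] * n
--     return out
-- ===== Notes on version B (the rewrite author's own statement) =====
-- stated objective: alternative
-- what changed: Replaces A's all-pairs scan with a hash index on set2: a counter of (chrom,start,end) triples for shift==0 and per-chromosome buckets for shift!=0, emitting each set1 domain with its match count (intended as faster; a timing run measured 2.03x at the largest size but inconsistently, so no speed is claimed).
-- outside the precondition, e.g. on find_common_domains([[1]], [[2, 3, 4]], 0): A returns [], B raises IndexError
import Mathlib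
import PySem

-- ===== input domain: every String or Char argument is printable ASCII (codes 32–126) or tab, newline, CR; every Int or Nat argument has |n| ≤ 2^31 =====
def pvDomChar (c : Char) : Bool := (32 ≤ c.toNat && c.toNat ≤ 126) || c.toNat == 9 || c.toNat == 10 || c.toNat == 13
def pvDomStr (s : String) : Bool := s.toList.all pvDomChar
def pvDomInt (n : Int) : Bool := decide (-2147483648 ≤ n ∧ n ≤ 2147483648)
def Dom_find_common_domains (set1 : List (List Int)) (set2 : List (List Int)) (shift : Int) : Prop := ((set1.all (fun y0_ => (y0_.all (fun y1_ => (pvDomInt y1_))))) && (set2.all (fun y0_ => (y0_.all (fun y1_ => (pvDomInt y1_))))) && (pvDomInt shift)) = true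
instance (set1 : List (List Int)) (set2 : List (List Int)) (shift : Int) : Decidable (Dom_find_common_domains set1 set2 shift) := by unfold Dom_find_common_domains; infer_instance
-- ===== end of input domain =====

-- B replaces A's all-pairs scan by a hash index on set2 (exact-triple counter for shift == 0,
-- per-chromosome buckets otherwise); return value only, neither program mutates its arguments.

-- ===== PORT A =====
-- check_domains: exact-boundary comparison (subscripts via pyGetD; Pre_ keeps indices in range)
def pvA_check_domains (domain1 domain2 : List Int) : Bool :=
  if PySem.List.pyGetD domain2 0 0 ≠ PySem.List.pyGetD domain1 0 0 then false
  else if PySem.List.pyGetD domain1 1 0 = PySem.List.pyGetD domain2 1 0 ∧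
          PySem.List.pyGetD domain1 2 0 = PySem.List.pyGetD domain2 2 0 then true
  else false

-- check_shifted_domains: 'x in range(a, b)' is a ≤ x < b
def pvA_check_shifted_domains (domain1 domain2 : List Int) (shift : Int) : Bool :=
  if PySem.List.pyGetD domain1 0 0 ≠ PySem.List.pyGetD domain2 0 0 then false
  else
    let start := if PySem.List.pyGetD domain2 1 0 - shift < 0 then 0
                 else PySem.List.pyGetD domain2 1 0 - shift
    if start ≤ PySem.List.pyGetD domain1 1 0 ∧
       PySem.List.pyGetD domain1 1 0 < PySem.List.pyGetD domain2 1 0 + shift then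
      if PySem.List.pyGetD domain2 2 0 - shift ≤ PySem.List.pyGetD domain1 2 0 ∧
         PySem.List.pyGetD domain1 2 0 < PySem.List.pyGetD domain2 2 0 + shift then true
      else false
    else false

def find_common_domains (set1 : List (List Int)) (set2 : List (List Int)) (shift : Int) : List (List Int) :=
  set1.foldl (fun common_domains d1 =>
    set2.foldl (fun common_domains d2 =>
      if shift = 0 then
        if pvA_check_domains d1 d2 then common_domains ++ [d1] else common_domains
      else
        if pvA_check_shifted_domains d1 d2 shift then common_domains ++ [d1] else common_domains)
      common_domains) []

-- ===== PORT B =====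
-- (d[0], d[1], d[2])
def pvB_key (d : List Int) : Int × Int × Int :=
  (PySem.List.pyGetD d 0 0, PySem.List.pyGetD d 1 0, PySem.List.pyGetD d 2 0)

-- the body of B's bucket loop for shift != 0
def pvB_shift_match (d b : List Int) (shift : Int) : Bool :=
  let lo := PySem.List.pyGetD b 1 0 - shift
  let lo := if lo < 0 then 0 else lo
  if lo ≤ PySem.List.pyGetD d 1 0 ∧ PySem.List.pyGetD d 1 0 < PySem.List.pyGetD b 1 0 + shift ∧
     PySem.List.pyGetD b 2 0 - shift ≤ PySem.List.pyGetD d 2 0 ∧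
     PySem.List.pyGetD d 2 0 < PySem.List.pyGetD b 2 0 + shift then true
  else false

def find_common_domains_alt (set1 : List (List Int)) (set2 : List (List Int)) (shift : Int) : List (List Int) :=
  if shift = 0 then
    let counts : PySem.Dict (Int × Int × Int) Int :=
      set2.foldl (fun c d => c.insert (pvB_key d) (c.getD (pvB_key d) 0 + 1)) PySem.Dict.empty
    set1.foldl (fun out d => out ++ List.replicate (counts.getD (pvB_key d) 0).toNat d) []
  else
    let buckets : PySem.Dict Int (List (List Int)) :=
      set2.foldl (fun bk d => bk.modify (PySem.List.pyGetD d 0 0) [] (· ++ [d])) PySem.Dict.empty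
    set1.foldl (fun out d =>
      let n : Int := (buckets.getD (PySem.List.pyGetD d 0 0) []).foldl
        (fun n b => if pvB_shift_match d b shift then n + 1 else n) 0
      out ++ List.replicate n.toNat d) []

-- ===== PRECONDITION & SPEC =====
-- Pre_ requires each domain to carry the fields the programs actually read: for shift == 0 all
-- three fields (chromosome, start, end) of every domain (B's counter reads them eagerly, so Pre_
-- excludes some malformed short domains on which A still returns because its short-circuiting
-- happens to skip the missing field); for shift != 0 a chromosome field everywhere and the three
-- fields on chromosome-matching pairs (both programs stop at the chromosome test otherwise).
def Pre_find_common_domains (set1 : List (List Int)) (set2 : List (List Int)) (shift : Int) : Prop :=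
  if shift = 0 then (∀ d ∈ set1, 3 ≤ d.length) ∧ (∀ d ∈ set2, 3 ≤ d.length)
  else (∀ d ∈ set1, 1 ≤ d.length) ∧ (∀ d ∈ set2, 1 ≤ d.length) ∧
    ∀ d1 ∈ set1, ∀ d2 ∈ set2, d1.getD 0 0 = d2.getD 0 0 → 3 ≤ d1.length ∧ 3 ≤ d2.length
instance (set1 : List (List Int)) (set2 : List (List Int)) (shift : Int) : Decidable (Pre_find_common_domains set1 set2 shift) := by unfold Pre_find_common_domains; infer_instance

def pvWitness_find_common_domains : List (List Int) × List (List Int) × Int :=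
  ([[1, 10, 20], [2, 5, 9]], [[1, 10, 20], [1, 11, 21]], 0)

def Spec_find_common_domains (set1 : List (List Int)) (set2 : List (List Int)) (shift : Int) (out : List (List Int)) : Prop := out = find_common_domains_alt set1 set2 shift
instance (set1 : List (List Int)) (set2 : List (List Int)) (shift : Int) (out : List (List Int)) : Decidable (Spec_find_common_domains set1 set2 shift out) := by unfold Spec_find_common_domains; infer_instance

-- ===== CLAIM (what is proved, stated in full; the proofs are below) =====
def Claim_equal_find_common_domains : Prop := ∀ (set1 : List (List Int)) (set2 : List (List Int)) (shift : Int), Dom_find_common_domains set1 set2 shift → Pre_find_common_domains set1 set2 shift → Spec_find_common_domains set1 set2 shift (find_common_domains set1 set2 shift)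

-- ===== LEMMAS AND PROOFS =====

-- A's exact test is equality of B's key triples
lemma check_domains_eq_key (d1 d2 : List Int) :
    pvA_check_domains d1 d2 = (pvB_key d2 == pvB_key d1) := by
  simp only [pvA_check_domains, pvB_key]
  by_cases h0 : PySem.List.pyGetD d2 0 0 = PySem.List.pyGetD d1 0 0 <;>
    by_cases h1 : PySem.List.pyGetD d1 1 0 = PySem.List.pyGetD d2 1 0 <;>
      by_cases h2 : PySem.List.pyGetD d1 2 0 = PySem.List.pyGetD d2 2 0 <;>
        simp_all <;> omega

-- A's shifted test is (same chromosome) && B's box test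
lemma check_shifted_eq (d1 d2 : List Int) (shift : Int) :
    pvA_check_shifted_domains d1 d2 shift =
      ((PySem.List.pyGetD d2 0 0 == PySem.List.pyGetD d1 0 0) && pvB_shift_match d1 d2 shift) := by
  simp only [pvA_check_shifted_domains, pvB_shift_match]
  split_ifs <;> simp_all <;> omega

-- the shift == 0 case of the equivalence
lemma eq_zero_case (set1 set2 : List (List Int)) :
    find_common_domains set1 set2 0 = find_common_domains_alt set1 set2 0 := by
  simp only [find_common_domains, find_common_domains_alt]
  have hcount : set2.foldl (fun c d => c.insert (pvB_key d) (c.getD (pvB_key d) 0 + 1))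
      PySem.Dict.empty = PySem.Dict.counter (set2.map pvB_key) := by
    rw [← PySem.Dict.foldl_insert_getD_add_one_eq_counter, List.foldl_map]
  rw [hcount]
  simp only [if_true, PySem.List.foldl_append_if,
    PySem.List.foldl_append_eq_flatMap, List.nil_append]
  apply List.flatMap_congr
  intro d1 _
  rw [PySem.Dict.getD_counter, Int.toNat_natCast, List.count_eq_countP, List.countP_map]
  have : (set2.filter (pvA_check_domains d1)).map (fun _ => d1)
      = List.replicate (set2.filter (pvA_check_domains d1)).length d1 := List.map_const
  rw [this, ← List.countP_eq_length_filter]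
  congr 1
  apply List.countP_congr
  intro d2 _
  simp [check_domains_eq_key, Function.comp]

-- buckets.getD c [] is the chromosome-c sublist of set2
lemma buckets_getD (set2 : List (List Int)) (c : Int) :
    (set2.foldl (fun bk d => bk.modify (PySem.List.pyGetD d 0 0) [] (· ++ [d]))
        PySem.Dict.empty).getD c []
      = set2.filter (fun d => PySem.List.pyGetD d 0 0 == c) := by
  have h : set2.foldl (fun bk d => bk.modify (PySem.List.pyGetD d 0 0) [] (· ++ [d]))
      PySem.Dict.empty
      = (set2.map (fun d => (PySem.List.pyGetD d 0 0, d))).foldl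
          (fun bk p => bk.modify p.1 [] (· ++ [p.2])) PySem.Dict.empty := by
    rw [List.foldl_map]
  rw [h, PySem.Dict.getD_foldl_modify_append, PySem.Dict.getD_empty, List.nil_append,
    List.filter_map]
  simp [Function.comp_def]

-- the shift ≠ 0 case of the equivalence
lemma eq_nonzero_case (set1 set2 : List (List Int)) (shift : Int) (hs : shift ≠ 0) :
    find_common_domains set1 set2 shift = find_common_domains_alt set1 set2 shift := by
  simp only [find_common_domains, find_common_domains_alt, if_neg hs]
  simp only [PySem.List.foldl_append_if, PySem.List.foldl_append_eq_flatMap, List.nil_append]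
  apply List.flatMap_congr
  intro d1 _
  rw [buckets_getD]
  rw [PySem.List.foldl_if_add_one (fun b => pvB_shift_match d1 b shift), zero_add,
    Int.toNat_natCast, List.countP_filter]
  have : (set2.filter (fun d2 => pvA_check_shifted_domains d1 d2 shift)).map (fun _ => d1)
      = List.replicate (set2.filter (fun d2 => pvA_check_shifted_domains d1 d2 shift)).length d1 :=
    List.map_const
  rw [this, ← List.countP_eq_length_filter]
  congr 1
  apply List.countP_congr
  intro d2 _
  rw [check_shifted_eq, Bool.and_comm]

-- ===== VERDICT (by name: the statement is the Claim_ definition above) =====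
theorem find_common_domains_spec : Claim_equal_find_common_domains := by
  intro set1 set2 shift _ _
  unfold Spec_find_common_domains
  by_cases hs : shift = 0
  · subst hs; exact eq_zero_case set1 set2
  · exact eq_nonzero_case set1 set2 shift hs
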